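-- pv_equiv track=rewrite | github.com/SchmidtCode/rackpatch | scripts/check_package_updates.py | resolve_hosts
-- ===== SOURCE A (Python) =====
-- def resolve_hosts(inventory: dict, scope: str, requested_hosts: list[str]) -> list[str]:
--     if requested_hosts:
--         return requested_hosts
--
--     def group_hosts(name: str, seen: set[str] | None = None) -> list[str]:
--         seen = seen or set()
--         if name in seen:
--             return []
--         seen.add(name)
--         group = inventory.get(name) or {}
--         selected: list[str] = list(group.get("hosts") or [])
--         for child in group.get("children") or []:
--             for host in group_hosts(child, seen):
--                 if host not in selected:
--                     selected.append(host)
--         return selected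
--
--     if scope == "all":
--         selected: list[str] = []
--         for host in group_hosts("proxmox_nodes") + group_hosts("guests"):
--             if host not in selected:
--                 selected.append(host)
--         return selected
--     if scope == "guests":
--         return group_hosts("guests")
--     if scope == "docker_hosts":
--         return group_hosts("docker_hosts")
--     if scope in {"proxmox", "proxmox_nodes"}:
--         return group_hosts("proxmox_nodes")
--     return [scope]
-- ===== SOURCE B (Python) =====
-- def resolve_hosts(inventory: dict, scope: str, requested_hosts: list[str]) -> list[str]:
--     if requested_hosts:
--         return requested_hosts
--
--     def dfs(start: str) -> list[str]:
--         # iterative explicit-stack preorder DFS instead of A's recursion-with-merge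
--         group = inventory.get(start) or {}
--         out = list(group.get("hosts") or [])
--         visited = {start}
--         stack = list(reversed(group.get("children") or []))
--         while stack:
--             name = stack.pop()
--             if name in visited:
--                 continue
--             visited.add(name)
--             group = inventory.get(name) or {}
--             for host in group.get("hosts") or []:
--                 if host not in out:
--                     out.append(host)
--             stack.extend(reversed(group.get("children") or []))
--         return out
--
--     if scope == "all":
--         combined = []
--         for host in dfs("proxmox_nodes") + dfs("guests"):
--             if host not in combined:
--                 combined.append(host)
--         return combined
--     if scope == "guests":
--         return dfs("guests")
--     if scope == "docker_hosts":
--         return dfs("docker_hosts")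
--     if scope in {"proxmox", "proxmox_nodes"}:
--         return dfs("proxmox_nodes")
--     return [scope]
-- ===== Notes on version B (the rewrite author's own statement) =====
-- stated objective: alternative
-- what changed: Replaces the recursive group_hosts (which builds each subtree's host list locally and merges child results into the parent with a membership check) by an iterative explicit-stack preorder DFS that marks nodes visited on pop and appends each node's hosts directly to one output list, pushing children in reverse for left-to-right order.
import Mathlib
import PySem

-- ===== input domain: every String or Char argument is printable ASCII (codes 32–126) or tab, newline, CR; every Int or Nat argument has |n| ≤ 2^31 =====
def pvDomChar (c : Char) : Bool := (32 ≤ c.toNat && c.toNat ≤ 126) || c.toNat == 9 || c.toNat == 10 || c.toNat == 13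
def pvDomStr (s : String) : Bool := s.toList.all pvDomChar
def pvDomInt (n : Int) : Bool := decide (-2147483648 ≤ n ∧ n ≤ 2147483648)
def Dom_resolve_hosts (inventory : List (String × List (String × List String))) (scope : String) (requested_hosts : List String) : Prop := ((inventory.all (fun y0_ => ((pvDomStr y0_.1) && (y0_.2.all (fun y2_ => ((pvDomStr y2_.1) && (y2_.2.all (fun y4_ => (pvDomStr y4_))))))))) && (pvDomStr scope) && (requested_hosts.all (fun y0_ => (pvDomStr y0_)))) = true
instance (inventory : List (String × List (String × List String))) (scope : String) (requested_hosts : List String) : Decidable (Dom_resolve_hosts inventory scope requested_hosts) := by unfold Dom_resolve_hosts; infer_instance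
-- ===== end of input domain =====

-- B replaces A's recursive group_hosts (local lists merged upward) by an iterative
-- explicit-stack preorder DFS appending into one output list; objective: alternative
-- (same asymptotic cost, no recursion).

-- shared small helpers: both Pythons contain the loop "for h in l: if h not in sel: sel.append(h)"
def mergeInto (sel : List String) (hs : List String) : List String :=
  hs.foldl (fun s h => if s.contains h then s else s ++ [h]) sel

-- "inventory.get(name) or {}" (an absent key and an empty dict both give {})
def getGroup (inv : List (String × List (String × List String))) (name : String) : List (String × List String) :=
  PySem.Dict.getD (PySem.Dict.mk inv) name []

-- "group.get("hosts") or []"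
def getHosts (group : List (String × List String)) : List String :=
  PySem.Dict.getD (PySem.Dict.mk group) "hosts" []

-- "group.get("children") or []"
def getChildren (group : List (String × List String)) : List String :=
  PySem.Dict.getD (PySem.Dict.mk group) "children" []

-- all names the recursion can ever be called on below the root: keys and every string in the values
def uNames (inv : List (String × List (String × List String))) : List String :=
  inv.map Prod.fst ++ inv.flatMap (fun g => g.2.flatMap Prod.snd)

-- ===== PORT A =====
-- group_hosts(name, seen): Python terminates because `seen` only grows inside the finite
-- name universe; the Nat fuel (fuelA, proven-sufficient bound) only makes that measure explicit.
def groupHostsA (inv : List (String × List (String × List String))) :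
    Nat → String → PySem.Set String → List String × PySem.Set String
  | 0, _, seen => ([], seen)
  | fuel + 1, name, seen =>
    if seen.contains name then ([], seen)
    else
      let seen1 := seen.add name
      let group := getGroup inv name
      (getChildren group).foldl
        (fun st child =>
          let r := groupHostsA inv fuel child st.2
          (mergeInto st.1 r.1, r.2))
        (getHosts group, seen1)

def fuelA (inv : List (String × List (String × List String))) : Nat :=
  (uNames inv).length + 1

def resolve_hosts (inventory : List (String × List (String × List String))) (scope : String) (requested_hosts : List String) : List String :=
  if requested_hosts ≠ [] then requested_hosts
  else if scope = "all" then
    mergeInto [] ((groupHostsA inventory (fuelA inventory) "proxmox_nodes" PySem.Set.empty).1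
      ++ (groupHostsA inventory (fuelA inventory) "guests" PySem.Set.empty).1)
  else if scope = "guests" then
    (groupHostsA inventory (fuelA inventory) "guests" PySem.Set.empty).1
  else if scope = "docker_hosts" then
    (groupHostsA inventory (fuelA inventory) "docker_hosts" PySem.Set.empty).1
  else if scope = "proxmox" ∨ scope = "proxmox_nodes" then
    (groupHostsA inventory (fuelA inventory) "proxmox_nodes" PySem.Set.empty).1
  else [scope]

-- ===== PORT B =====
-- the while loop of Source B's dfs; the list head is the Python stack's top, so
-- "stack.extend(reversed(children))" is "children ++ stack".  Fuel = proven-sufficient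
-- iteration bound (the Python loop terminates because every push comes from a newly
-- visited node of the finite name universe).
def loopB (inv : List (String × List (String × List String))) :
    Nat → List String → PySem.Set String → List String → List String
  | 0, _, _, out => out
  | _ + 1, [], _, out => out
  | fuel + 1, name :: stack, visited, out =>
    if visited.contains name then loopB inv fuel stack visited out
    else
      let visited1 := visited.add name
      let group := getGroup inv name
      loopB inv fuel (getChildren group ++ stack) visited1 (mergeInto out (getHosts group))

def maxC (inv : List (String × List (String × List String))) : Nat :=
  inv.foldr (fun g m => max (getChildren g.2).length m) 0

def fuelB (inv : List (String × List (String × List String))) : Nat :=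
  ((uNames inv).length + 1) * (maxC inv + 1)

def dfsB (inv : List (String × List (String × List String))) (start : String) : List String :=
  let group := getGroup inv start
  loopB inv (fuelB inv) (getChildren group) (PySem.Set.add PySem.Set.empty start) (getHosts group)

def resolve_hosts_alt (inventory : List (String × List (String × List String))) (scope : String) (requested_hosts : List String) : List String :=
  if requested_hosts ≠ [] then requested_hosts
  else if scope = "all" then
    mergeInto [] (dfsB inventory "proxmox_nodes" ++ dfsB inventory "guests")
  else if scope = "guests" then dfsB inventory "guests"
  else if scope = "docker_hosts" then dfsB inventory "docker_hosts"
  else if scope = "proxmox" ∨ scope = "proxmox_nodes" then dfsB inventory "proxmox_nodes"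
  else [scope]

-- ===== PRECONDITION & SPEC =====
def Spec_resolve_hosts (inventory : List (String × List (String × List String))) (scope : String) (requested_hosts : List String) (out : List String) : Prop := out = resolve_hosts_alt inventory scope requested_hosts
instance (inventory : List (String × List (String × List String))) (scope : String) (requested_hosts : List String) (out : List String) : Decidable (Spec_resolve_hosts inventory scope requested_hosts out) := by unfold Spec_resolve_hosts; infer_instance

-- ===== CLAIM (what is proved, stated in full; the proofs are below) =====
def Claim_equal_resolve_hosts : Prop := ∀ (inventory : List (String × List (String × List String))) (scope : String) (requested_hosts : List String), Dom_resolve_hosts inventory scope requested_hosts → Spec_resolve_hosts inventory scope requested_hosts (resolve_hosts inventory scope requested_hosts)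

-- ===== LEMMAS AND PROOFS =====

-- remaining capacity of `seen` inside the name universe
def cRem (inv : List (String × List (String × List String))) (s : PySem.Set String) : Nat :=
  ((uNames inv).filter (fun n => !(s.contains n))).length

-- loop potential: stack size + capacity × (max children pushed per visit + 1)
def phiB (inv : List (String × List (String × List String))) (stack : List String) (vis : PySem.Set String) : Nat :=
  stack.length + cRem inv vis * (maxC inv + 1)

lemma contains_add_iff (s : PySem.Set String) (x y : String) :
    (PySem.Set.add s x).contains y = true ↔ s.contains y = true ∨ y = x := by
  simp [PySem.Set.mem_add]

lemma mergeInto_cons (a s : List String) (h : String) :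
    mergeInto a (h :: s) = mergeInto (if a.contains h then a else a ++ [h]) s := by
  simp only [mergeInto, List.foldl_cons]

lemma mergeInto_nil (a : List String) : mergeInto a [] = a := rfl

lemma mergeInto_append (a s t : List String) :
    mergeInto a (s ++ t) = mergeInto (mergeInto a s) t := by
  simp only [mergeInto, List.foldl_append]

lemma mem_mergeInto (a s : List String) (x : String) :
    x ∈ mergeInto a s ↔ x ∈ a ∨ x ∈ s := by
  induction s generalizing a with
  | nil => simp [mergeInto_nil]
  | cons h s ih =>
    rw [mergeInto_cons, ih]
    by_cases hc : a.contains h = true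
    · have hm : h ∈ a := List.contains_iff_mem.mp hc
      rw [if_pos hc]
      simp only [List.mem_cons]
      constructor
      · tauto
      · rintro (hx | rfl | hx) <;> tauto
    · rw [if_neg hc]
      simp only [List.mem_append, List.mem_cons]
      tauto

lemma mergeInto_step (a s : List String) (h : String) :
    mergeInto a (if s.contains h then s else s ++ [h])
      = (if (mergeInto a s).contains h then mergeInto a s else mergeInto a s ++ [h]) := by
  by_cases hc : s.contains h = true
  · rw [if_pos hc, if_pos]
    exact List.contains_iff_mem.mpr ((mem_mergeInto a s h).mpr (Or.inr (List.contains_iff_mem.mp hc)))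
  · rw [if_neg hc, mergeInto_append]
    rfl

lemma mergeInto_assoc (a s t : List String) :
    mergeInto a (mergeInto s t) = mergeInto (mergeInto a s) t := by
  induction t generalizing s with
  | nil => rfl
  | cons h t ih =>
    rw [mergeInto_cons s, ih, mergeInto_step, ← mergeInto_cons]

lemma length_filter_le_of_imp {α : Type} (l : List α) (p q : α → Bool)
    (h : ∀ x, p x = true → q x = true) : (l.filter p).length ≤ (l.filter q).length := by
  induction l with
  | nil => simp
  | cons a l ih =>
    by_cases hp : p a = true
    · simp [hp, h a hp]; omega
    · simp only [List.filter_cons]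
      rw [if_neg (by simp [hp])]
      by_cases hq : q a = true
      · rw [if_pos (by simp [hq])]; simp; omega
      · rw [if_neg (by simp [hq])]; exact ih

lemma length_filter_lt_of_mem {α : Type} (l : List α) (p q : α → Bool) (a : α)
    (h : ∀ x, p x = true → q x = true) (ha : a ∈ l) (hp : p a = false) (hq : q a = true) :
    (l.filter p).length < (l.filter q).length := by
  induction l with
  | nil => simp at ha
  | cons b l ih =>
    rcases List.mem_cons.mp ha with rfl | hb
    · simp only [List.filter_cons]
      rw [if_neg (by simp [hp]), if_pos (by simp [hq])]
      simp only [List.length_cons]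
      have := length_filter_le_of_imp l p q h
      omega
    · have hlt := ih hb
      by_cases hpb : p b = true
      · simp only [List.filter_cons]
        rw [if_pos (by simp [hpb]), if_pos (by simp [h b hpb])]
        simpa using hlt
      · simp only [List.filter_cons]
        rw [if_neg (by simp [hpb])]
        by_cases hqb : q b = true
        · rw [if_pos (by simp [hqb])]; simp; omega
        · rw [if_neg (by simp [hqb])]; exact hlt

lemma cRem_mono (inv : List (String × List (String × List String))) (v w : PySem.Set String)
    (h : ∀ x, v.contains x = true → w.contains x = true) : cRem inv w ≤ cRem inv v := by
  apply length_filter_le_of_imp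
  intro x hx
  simp only [Bool.not_eq_true'] at hx ⊢
  cases hv : v.contains x
  · rfl
  · have h2 := h x hv
    rw [h2] at hx
    simp at hx

lemma cRem_add_lt (inv : List (String × List (String × List String))) (v : PySem.Set String) (n : String)
    (hm : n ∈ uNames inv) (hc : v.contains n = false) : cRem inv (v.add n) < cRem inv v := by
  refine length_filter_lt_of_mem _ _ _ n ?_ hm ?_ ?_
  · intro x hx
    simp only [Bool.not_eq_true'] at hx ⊢
    cases hv : v.contains x
    · rfl
    · have h2 := (contains_add_iff v n x).mpr (Or.inl hv)
      rw [h2] at hx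
      simp at hx
  · have h1 : (PySem.Set.add v n).contains n = true := (contains_add_iff v n n).mpr (Or.inr rfl)
    simp [h1]
  · simp only [Bool.not_eq_true']
    exact hc

lemma cRem_add_of_not_mem (inv : List (String × List (String × List String))) (v : PySem.Set String) (n : String)
    (hm : n ∉ uNames inv) : cRem inv (v.add n) = cRem inv v := by
  unfold cRem
  congr 1
  apply List.filter_congr
  intro x hx
  have hxn : x ≠ n := fun h => hm (h ▸ hx)
  congr 1
  cases hv : v.contains x
  · cases hv2 : (PySem.Set.add v n).contains x
    · rfl
    · rcases (contains_add_iff v n x).mp hv2 with h | h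
      · rw [h] at hv; cases hv
      · exact absurd h hxn
  · exact (contains_add_iff v n x).mpr (Or.inl hv)

lemma getD_mk_nil {β : Type} (k : String) (d : β) :
    PySem.Dict.getD (PySem.Dict.mk ([] : List (String × β))) k d = d := by
  rw [PySem.Dict.getD_eq_get?_getD,
    (PySem.Dict.get?_eq_none_iff_not_mem_keys _ _).mpr (by simp [PySem.Dict.keys_mk])]
  rfl

lemma getD_mk_cases {β : Type} (l : List (String × β)) (k : String) (d : β) :
    PySem.Dict.getD (PySem.Dict.mk l) k d = d ∨ PySem.Dict.getD (PySem.Dict.mk l) k d ∈ l.map Prod.snd := by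
  induction l with
  | nil => exact Or.inl (getD_mk_nil k d)
  | cons p l ih =>
    rw [PySem.Dict.getD_eq_get?_getD, PySem.Dict.get?_mk_cons]
    by_cases hk : (p.1 == k) = true
    · right
      rw [if_pos hk]
      simp
    · rw [if_neg hk, ← PySem.Dict.getD_eq_get?_getD]
      rcases ih with h | h
      · exact Or.inl h
      · right
        simp only [List.map_cons, List.mem_cons]
        exact Or.inr h

lemma getChildren_nil : getChildren [] = [] := getD_mk_nil _ _

lemma getHosts_nil : getHosts [] = [] := getD_mk_nil _ _

lemma getGroup_nil_of_not_mem (inv : List (String × List (String × List String))) (name : String)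
    (h : name ∉ uNames inv) : getGroup inv name = [] := by
  have hk : name ∉ inv.map Prod.fst := fun hm => h (by unfold uNames; exact List.mem_append.mpr (Or.inl hm))
  unfold getGroup
  rw [PySem.Dict.getD_eq_get?_getD,
    (PySem.Dict.get?_eq_none_iff_not_mem_keys _ _).mpr (by rw [PySem.Dict.keys_mk]; exact hk)]
  rfl

lemma getChildren_sub_group (group : List (String × List String)) (c : String)
    (hc : c ∈ getChildren group) : ∃ v ∈ group.map Prod.snd, c ∈ v := by
  rcases getD_mk_cases group "children" ([] : List String) with h | h
  · rw [getChildren, h] at hc; simp at hc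
  · exact ⟨getChildren group, h, hc⟩

lemma children_sub (inv : List (String × List (String × List String))) (name c : String)
    (hc : c ∈ getChildren (getGroup inv name)) : c ∈ uNames inv := by
  rcases getD_mk_cases inv name ([] : List (String × List String)) with h | h
  · rw [getGroup, h, getChildren_nil] at hc; simp at hc
  · rcases getChildren_sub_group _ _ hc with ⟨v, hv, hcv⟩
    have hg : getGroup inv name ∈ inv.map Prod.snd := h
    simp only [uNames, List.mem_append, List.mem_flatMap, List.mem_map] at *
    right
    rcases hg with ⟨p, hp, hpe⟩
    refine ⟨p, hp, ?_⟩
    rcases hv with ⟨q, hq, hqe⟩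
    exact ⟨q, by rw [hpe]; exact hq, by rw [hqe]; exact hcv⟩

lemma le_maxC_of_mem (inv : List (String × List (String × List String)))
    (p : String × List (String × List String)) (hp : p ∈ inv) :
    (getChildren p.2).length ≤ maxC inv := by
  induction inv with
  | nil => simp at hp
  | cons q inv ih =>
    rcases List.mem_cons.mp hp with rfl | hp
    · simp [maxC]
    · have := ih hp
      simp only [maxC, List.foldr_cons] at *
      omega

lemma children_len_le (inv : List (String × List (String × List String))) (name : String) :
    (getChildren (getGroup inv name)).length ≤ maxC inv := by
  rcases getD_mk_cases inv name ([] : List (String × List String)) with h | h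
  · rw [getGroup, h, getChildren_nil]; simp
  · have hg : getGroup inv name ∈ inv.map Prod.snd := h
    rcases List.mem_map.mp hg with ⟨p, hp, hpe⟩
    have := le_maxC_of_mem inv p hp
    rw [hpe] at this
    exact this

-- the child-merging step of A's inner for-loop, named for the proofs
def stepA (inv : List (String × List (String × List String))) (fA : Nat)
    (st : List String × PySem.Set String) (child : String) : List String × PySem.Set String :=
  let r := groupHostsA inv fA child st.2
  (mergeInto st.1 r.1, r.2)

lemma groupHostsA_succ (inv : List (String × List (String × List String))) (fA : Nat)
    (name : String) (seen : PySem.Set String) :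
    groupHostsA inv (fA + 1) name seen
      = if seen.contains name then ([], seen)
        else (getChildren (getGroup inv name)).foldl (stepA inv fA)
          (getHosts (getGroup inv name), seen.add name) := rfl

lemma loopB_skip_eq (inv : List (String × List (String × List String))) (f : Nat)
    (name : String) (stack : List String) (visited : PySem.Set String) (out : List String)
    (hv : visited.contains name = true) :
    loopB inv (f + 1) (name :: stack) visited out = loopB inv f stack visited out := by
  simp only [loopB]
  rw [if_pos hv]

lemma loopB_visit_eq (inv : List (String × List (String × List String))) (f : Nat)
    (name : String) (stack : List String) (visited : PySem.Set String) (out : List String)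
    (hv : visited.contains name = false) :
    loopB inv (f + 1) (name :: stack) visited out
      = loopB inv f (getChildren (getGroup inv name) ++ stack) (visited.add name)
          (mergeInto out (getHosts (getGroup inv name))) := by
  simp only [loopB]
  rw [if_neg (by rw [hv]; exact Bool.false_ne_true)]

lemma foldA_mono (inv : List (String × List (String × List String))) (fA : Nat)
    (hmono : ∀ (name : String) (seen : PySem.Set String) (x : String),
      seen.contains x = true → ((groupHostsA inv fA name seen).2).contains x = true) :
    ∀ (cs : List String) (st : List String × PySem.Set String) (x : String),
      st.2.contains x = true → ((cs.foldl (stepA inv fA) st).2).contains x = true := by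
  intro cs
  induction cs with
  | nil => intro st x h; exact h
  | cons c cs ihc =>
    intro st x h
    rw [List.foldl_cons]
    exact ihc _ x (hmono c st.2 x h)

lemma monoA (inv : List (String × List (String × List String))) :
    ∀ (fuel : Nat) (name : String) (seen : PySem.Set String) (x : String),
      seen.contains x = true → ((groupHostsA inv fuel name seen).2).contains x = true := by
  intro fuel
  induction fuel with
  | zero => intro name seen x hx; exact hx
  | succ fA ih =>
    intro name seen x hx
    rw [groupHostsA_succ]
    by_cases hv : seen.contains name = true
    · rw [if_pos hv]; exact hx
    · rw [if_neg hv]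
      exact foldA_mono inv fA ih _ _ x ((contains_add_iff _ _ _).mpr (Or.inl hx))

lemma phiB_skip (inv : List (String × List (String × List String))) (name : String)
    (stack : List String) (vis : PySem.Set String) :
    phiB inv stack vis + 1 = phiB inv (name :: stack) vis := by
  unfold phiB
  simp only [List.length_cons]
  omega

lemma phiB_visit (inv : List (String × List (String × List String))) (name : String)
    (stack : List String) (vis : PySem.Set String) (hv : vis.contains name = false) :
    phiB inv (getChildren (getGroup inv name) ++ stack) (vis.add name) + 1 ≤ phiB inv (name :: stack) vis := by
  by_cases hm : name ∈ uNames inv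
  · have h1 := cRem_add_lt inv vis name hm hv
    have h2 := children_len_le inv name
    have h3 : cRem inv (vis.add name) * (maxC inv + 1) + (maxC inv + 1)
        ≤ cRem inv vis * (maxC inv + 1) := by
      have h4 := Nat.mul_le_mul_right (k := maxC inv + 1)
        (show cRem inv (vis.add name) + 1 ≤ cRem inv vis by omega)
      rw [Nat.succ_mul] at h4
      exact h4
    unfold phiB
    simp only [List.length_append, List.length_cons]
    generalize cRem inv (vis.add name) * (maxC inv + 1) = K at h3 ⊢
    generalize cRem inv vis * (maxC inv + 1) = L at h3 ⊢
    omega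
  · have h1 := cRem_add_of_not_mem inv vis name hm
    have h2 : getGroup inv name = [] := getGroup_nil_of_not_mem inv name hm
    rw [h2, getChildren_nil]
    unfold phiB
    rw [h1]
    simp

lemma loopB_irrel (inv : List (String × List (String × List String))) :
    ∀ (f1 f2 : Nat) (stack : List String) (vis : PySem.Set String) (out : List String),
      phiB inv stack vis < f1 → phiB inv stack vis < f2 →
      loopB inv f1 stack vis out = loopB inv f2 stack vis out := by
  intro f1
  induction f1 with
  | zero => intro f2 stack vis out h1 _; exact absurd h1 (Nat.not_lt_zero _)
  | succ n ih =>
    intro f2 stack vis out h1 h2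
    cases f2 with
    | zero => exact absurd h2 (Nat.not_lt_zero _)
    | succ m =>
      cases stack with
      | nil => rfl
      | cons name st =>
        by_cases hv : vis.contains name = true
        · rw [loopB_skip_eq inv n name st vis out hv, loopB_skip_eq inv m name st vis out hv]
          have hs := phiB_skip inv name st vis
          exact ih m st vis out (by omega) (by omega)
        · have hv' : vis.contains name = false := by simpa using hv
          rw [loopB_visit_eq inv n name st vis out hv', loopB_visit_eq inv m name st vis out hv']
          have hs := phiB_visit inv name st vis hv'
          exact ih m _ _ _ (by omega) (by omega)

lemma loopB_nil (inv : List (String × List (String × List String))) (f : Nat)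
    (vis : PySem.Set String) (out : List String) : loopB inv f [] vis out = out := by
  cases f <;> rfl

-- the heart: one recursive subtree of A equals the stack loop of B consuming that node
lemma mainM (inv : List (String × List (String × List String))) :
    ∀ (fA : Nat) (name : String) (stack : List String) (vis : PySem.Set String)
      (out : List String) (fB fB' : Nat),
      cRem inv vis < fA →
      phiB inv (name :: stack) vis < fB →
      phiB inv stack (groupHostsA inv fA name vis).2 < fB' →
      loopB inv fB (name :: stack) vis out
        = loopB inv fB' stack (groupHostsA inv fA name vis).2
            (mergeInto out (groupHostsA inv fA name vis).1) := by
  intro fA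
  induction fA with
  | zero => intro name stack vis out fB fB' hA _ _; exact absurd hA (Nat.not_lt_zero _)
  | succ fA ih =>
    intro name stack vis out fB fB' hA hB hB'
    cases fB with
    | zero => exact absurd hB (Nat.not_lt_zero _)
    | succ fB1 =>
    by_cases hv : vis.contains name = true
    · rw [groupHostsA_succ, if_pos hv] at hB' ⊢
      rw [loopB_skip_eq inv fB1 name stack vis out hv]
      have hs := phiB_skip inv name stack vis
      rw [show mergeInto out ([], vis).1 = out from mergeInto_nil out]
      exact loopB_irrel inv fB1 fB' stack vis out (by omega) hB'
    · have hv' : vis.contains name = false := by simpa using hv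
      rw [groupHostsA_succ, if_neg (by rw [hv']; exact Bool.false_ne_true)] at hB' ⊢
      rw [loopB_visit_eq inv fB1 name stack vis out hv']
      have Cacc : ∀ (l : List String), (∀ c ∈ l, c ∈ uNames inv) →
          ∀ (stack2 : List String) (st : List String × PySem.Set String) (out2 : List String) (fB2 fB3 : Nat),
          cRem inv st.2 < fA →
          phiB inv (l ++ stack2) st.2 < fB2 →
          phiB inv stack2 ((l.foldl (stepA inv fA) st)).2 < fB3 →
          loopB inv fB2 (l ++ stack2) st.2 (mergeInto out2 st.1)
            = loopB inv fB3 stack2 ((l.foldl (stepA inv fA) st)).2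
                (mergeInto out2 ((l.foldl (stepA inv fA) st)).1) := by
        intro l
        induction l with
        | nil =>
          intro _ stack2 st out2 fB2 fB3 _ h2 h3
          simp only [List.nil_append, List.foldl_nil] at h2 h3 ⊢
          exact loopB_irrel inv fB2 fB3 stack2 st.2 _ h2 h3
        | cons c l ihl =>
          intro hsub stack2 st out2 fB2 fB3 hrem h2 h3
          have hcr : cRem inv (groupHostsA inv fA c st.2).2 ≤ cRem inv st.2 :=
            cRem_mono inv _ _ (fun x hx => monoA inv fA c st.2 x hx)
          have hafter : phiB inv (l ++ stack2) (groupHostsA inv fA c st.2).2 < fB2 := by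
            have hsk := phiB_skip inv c (l ++ stack2) st.2
            have hle : phiB inv (l ++ stack2) (groupHostsA inv fA c st.2).2
                ≤ phiB inv (l ++ stack2) st.2 := by
              unfold phiB
              have := Nat.mul_le_mul_right (k := maxC inv + 1) hcr
              omega
            have h2' : phiB inv (c :: (l ++ stack2)) st.2 < fB2 := by simpa using h2
            omega
          have hM := ih c (l ++ stack2) st.2 (mergeInto out2 st.1) fB2 fB2 hrem
            (by simpa using h2) hafter
          rw [List.cons_append, hM, ← mergeInto_assoc]
          rw [List.foldl_cons] at h3 ⊢
          exact ihl (fun x hx => hsub x (List.mem_cons_of_mem c hx)) stack2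
            (stepA inv fA st c) out2 fB2 fB3 (Nat.lt_of_le_of_lt hcr hrem) hafter h3
      by_cases hmem : name ∈ uNames inv
      · have hsub : ∀ c ∈ getChildren (getGroup inv name), c ∈ uNames inv :=
          fun c hc => children_sub inv name c hc
        have hrem : cRem inv (vis.add name) < fA := by
          have := cRem_add_lt inv vis name hmem hv'
          omega
        have h2 : phiB inv (getChildren (getGroup inv name) ++ stack) (vis.add name) < fB1 := by
          have := phiB_visit inv name stack vis hv'
          omega
        exact Cacc (getChildren (getGroup inv name)) hsub stack
          (getHosts (getGroup inv name), vis.add name) out fB1 fB' hrem h2 hB'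
      · have hg : getGroup inv name = [] := getGroup_nil_of_not_mem inv name hmem
        rw [hg, getChildren_nil, getHosts_nil] at hB' ⊢
        simp only [List.nil_append, List.foldl_nil] at hB' ⊢
        have hcr : cRem inv (vis.add name) = cRem inv vis := cRem_add_of_not_mem inv vis name hmem
        have hs := phiB_skip inv name stack vis
        refine loopB_irrel inv fB1 fB' stack (vis.add name) _ ?_ hB'
        have : phiB inv stack (vis.add name) = phiB inv stack vis := by
          unfold phiB; rw [hcr]
        omega

lemma mainCplain (inv : List (String × List (String × List String))) (fA : Nat) :
    ∀ (l : List String), (∀ c ∈ l, c ∈ uNames inv) →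
      ∀ (stack2 : List String) (st : List String × PySem.Set String) (fB2 fB3 : Nat),
      cRem inv st.2 < fA →
      phiB inv (l ++ stack2) st.2 < fB2 →
      phiB inv stack2 ((l.foldl (stepA inv fA) st)).2 < fB3 →
      loopB inv fB2 (l ++ stack2) st.2 st.1
        = loopB inv fB3 stack2 ((l.foldl (stepA inv fA) st)).2 ((l.foldl (stepA inv fA) st)).1 := by
  intro l
  induction l with
  | nil =>
    intro _ stack2 st fB2 fB3 _ h2 h3
    simp only [List.nil_append, List.foldl_nil] at h2 h3 ⊢
    exact loopB_irrel inv fB2 fB3 stack2 st.2 _ h2 h3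
  | cons c l ihl =>
    intro hsub stack2 st fB2 fB3 hrem h2 h3
    have hcr : cRem inv (groupHostsA inv fA c st.2).2 ≤ cRem inv st.2 :=
      cRem_mono inv _ _ (fun x hx => monoA inv fA c st.2 x hx)
    have hafter : phiB inv (l ++ stack2) (groupHostsA inv fA c st.2).2 < fB2 := by
      have hsk := phiB_skip inv c (l ++ stack2) st.2
      have hle : phiB inv (l ++ stack2) (groupHostsA inv fA c st.2).2
          ≤ phiB inv (l ++ stack2) st.2 := by
        unfold phiB
        have := Nat.mul_le_mul_right (k := maxC inv + 1) hcr
        omega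
      have h2' : phiB inv (c :: (l ++ stack2)) st.2 < fB2 := by simpa using h2
      omega
    have hM := mainM inv fA c (l ++ stack2) st.2 st.1 fB2 fB2 hrem (by simpa using h2) hafter
    rw [List.cons_append, hM]
    rw [List.foldl_cons] at h3 ⊢
    exact ihl (fun x hx => hsub x (List.mem_cons_of_mem c hx)) stack2
      (stepA inv fA st c) fB2 fB3 (Nat.lt_of_le_of_lt hcr hrem) hafter h3

lemma dfs_eq (inv : List (String × List (String × List String))) (start : String) :
    dfsB inv start = (groupHostsA inv (fuelA inv) start PySem.Set.empty).1 := by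
  have hemp : (PySem.Set.empty : PySem.Set String).contains start = false := rfl
  show loopB inv (fuelB inv) (getChildren (getGroup inv start))
      (PySem.Set.add PySem.Set.empty start) (getHosts (getGroup inv start))
    = (groupHostsA inv (fuelA inv) start PySem.Set.empty).1
  rw [show fuelA inv = (uNames inv).length + 1 from rfl,
    groupHostsA_succ, if_neg (by rw [hemp]; exact Bool.false_ne_true)]
  by_cases hmem : start ∈ uNames inv
  · have h0 : cRem inv PySem.Set.empty ≤ (uNames inv).length := List.length_filter_le _ _
    have hrem : cRem inv (PySem.Set.empty.add start) < (uNames inv).length := by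
      have := cRem_add_lt inv PySem.Set.empty start hmem hemp
      omega
    have hcr : cRem inv (PySem.Set.empty.add start) ≤ (uNames inv).length := le_of_lt hrem
    have hmul1 := Nat.mul_le_mul_right (k := maxC inv + 1) hcr
    have hch := children_len_le inv start
    have hBre : fuelB inv = (uNames inv).length * (maxC inv + 1) + (maxC inv + 1) := by
      unfold fuelB; rw [Nat.succ_mul]
    have h2 : phiB inv (getChildren (getGroup inv start) ++ [])
        (PySem.Set.empty.add start) < fuelB inv := by
      unfold phiB
      rw [List.append_nil, hBre]
      generalize cRem inv (PySem.Set.empty.add start) * (maxC inv + 1) = K at hmul1 ⊢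
      generalize (uNames inv).length * (maxC inv + 1) = L at hmul1 ⊢
      omega
    have hcr2 : cRem inv ((getChildren (getGroup inv start)).foldl
        (stepA inv (uNames inv).length) (getHosts (getGroup inv start), PySem.Set.empty.add start)).2
        ≤ (uNames inv).length := le_trans (List.length_filter_le _ _) (le_refl _)
    have hmul2 := Nat.mul_le_mul_right (k := maxC inv + 1) hcr2
    have h3 : phiB inv [] ((getChildren (getGroup inv start)).foldl
        (stepA inv (uNames inv).length) (getHosts (getGroup inv start), PySem.Set.empty.add start)).2
        < fuelB inv := by
      unfold phiB
      rw [hBre]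
      simp only [List.length_nil]
      generalize cRem inv _ * (maxC inv + 1) = K at hmul2 ⊢
      generalize (uNames inv).length * (maxC inv + 1) = L at hmul2 ⊢
      omega
    have hC := mainCplain inv (uNames inv).length (getChildren (getGroup inv start))
      (fun c hc => children_sub inv start c hc) []
      (getHosts (getGroup inv start), PySem.Set.empty.add start) (fuelB inv) (fuelB inv)
      hrem h2 h3
    rw [List.append_nil] at hC
    rw [hC, loopB_nil]
  · have hg : getGroup inv start = [] := getGroup_nil_of_not_mem inv start hmem
    rw [hg, getChildren_nil, getHosts_nil]
    simp only [List.foldl_nil]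
    exact loopB_nil inv (fuelB inv) _ []

-- ===== VERDICT (by name: the statement is the Claim_ definition above) =====
theorem resolve_hosts_spec : Claim_equal_resolve_hosts := by
  intro inventory scope requested_hosts _
  unfold Spec_resolve_hosts resolve_hosts resolve_hosts_alt
  rw [dfs_eq, dfs_eq, dfs_eq]
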